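-- pv_equiv track=rewrite | github.com/Libre-SOC-mirrors/openpower-isa | src/openpower/decoder/isa/fastdctlee.py | halfrev2
-- ===== SOURCE A (Python) =====
-- def halfrev2(vec, pre_rev=True):
--     res = []
--     for i in range(len(vec)):
--         if pre_rev:
--             res.append(vec[i ^ (i>>1)])
--         else:
--             ri = i
--             bl = i.bit_length()
--             for ji in range(1, bl):
--                 ri ^= (i >> ji)
--             res.append(vec[ri])
--     return res
-- ===== SOURCE B (Python) =====
-- def halfrev2(vec, pre_rev=True):
--     n = len(vec)
--     if pre_rev:
--         return [vec[i ^ (i >> 1)] for i in range(n)]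
--     res = [None] * n
--     for j in range(n):
--         res[j ^ (j >> 1)] = vec[j]
--     return res
-- ===== Notes on version B (the rewrite author's own statement) =====
-- stated objective: alternative
-- what changed: The pre_rev=False branch's per-element xor-fold gray-decode is replaced by a single scatter pass res[j ^ (j>>1)] = vec[j], building the inverse permutation directly; the True branch becomes a comprehension.
import Mathlib
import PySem

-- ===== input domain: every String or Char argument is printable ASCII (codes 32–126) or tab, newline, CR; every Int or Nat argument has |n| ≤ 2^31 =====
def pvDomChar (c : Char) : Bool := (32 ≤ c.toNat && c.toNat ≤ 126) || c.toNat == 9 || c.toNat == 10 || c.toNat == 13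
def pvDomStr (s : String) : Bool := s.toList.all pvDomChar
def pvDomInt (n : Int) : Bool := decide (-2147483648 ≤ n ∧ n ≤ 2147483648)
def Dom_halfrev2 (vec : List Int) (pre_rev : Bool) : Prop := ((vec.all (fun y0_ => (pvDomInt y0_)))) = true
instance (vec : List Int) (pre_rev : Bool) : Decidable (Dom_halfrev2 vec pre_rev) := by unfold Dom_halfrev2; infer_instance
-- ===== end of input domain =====

-- B replaces A's per-element gray-decode loop (pre_rev=False) by a single scatter pass
-- res[j ^ (j>>1)] = vec[j]; objective: alternative (O(n) instead of O(n log n) on that branch).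

-- ===== PORT A =====
-- Loop indices i are nonnegative, so i ^ (i>>1) is Nat xor/shift; i.bit_length() is Nat.size i
-- (exact on Nat); range(1, bl) is List.range' 1 (bl-1). vec[idx] is in range on every input
-- admitted by Pre_halfrev2; getD 0 only totalizes the function outside it.
def halfrev2 (vec : List Int) (pre_rev : Bool) : List Int :=
  (List.range vec.length).foldl (fun res i =>
    if pre_rev then
      res ++ [vec.getD (i ^^^ (i >>> 1)) 0]
    else
      let bl := Nat.size i
      let ri := (List.range' 1 (bl - 1)).foldl (fun ri ji => ri ^^^ (i >>> ji)) i
      res ++ [vec.getD ri 0]) []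

-- ===== PORT B =====
-- Source B's `[None]*n` buffer is modeled as `List.replicate n 0`; inside Pre_halfrev2 the scatter
-- overwrites every cell, so the placeholder never survives. `res[k] = v` is List.set.
def halfrev2_alt (vec : List Int) (pre_rev : Bool) : List Int :=
  let n := vec.length
  if pre_rev then
    (List.range n).map (fun i => vec.getD (i ^^^ (i >>> 1)) 0)
  else
    (List.range n).foldl (fun res j => res.set (j ^^^ (j >>> 1)) (vec.getD j 0))
      (List.replicate n 0)

-- ===== PRECONDITION & SPEC =====
-- Pre_ excludes exactly the inputs on which Python A raises IndexError: lengths for which some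
-- gray-coded index i ^ (i>>1) (i < len) falls outside the list (equivalently, len is not 0 or a
-- power of two); A returns on all other inputs.
def Pre_halfrev2 (vec : List Int) (pre_rev : Bool) : Prop :=
  ∀ i < vec.length, (i ^^^ (i >>> 1)) < vec.length
instance (vec : List Int) (pre_rev : Bool) : Decidable (Pre_halfrev2 vec pre_rev) := by
  unfold Pre_halfrev2; infer_instance

def pvWitness_halfrev2 : List Int × Bool := ([3, -1, 4, 1], false)

def Spec_halfrev2 (vec : List Int) (pre_rev : Bool) (out : List Int) : Prop := out = halfrev2_alt vec pre_rev
instance (vec : List Int) (pre_rev : Bool) (out : List Int) : Decidable (Spec_halfrev2 vec pre_rev out) := by unfold Spec_halfrev2; infer_instance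

-- ===== CLAIM (what is proved, stated in full; the proofs are below) =====
def Claim_equal_halfrev2 : Prop := ∀ (vec : List Int) (pre_rev : Bool), Dom_halfrev2 vec pre_rev → Pre_halfrev2 vec pre_rev → Spec_halfrev2 vec pre_rev (halfrev2 vec pre_rev)

-- ===== LEMMAS AND PROOFS =====

-- Clean recursive gray-decode, used only by the proofs.
def gdec (i : Nat) : Nat :=
  if i = 0 then 0 else i ^^^ gdec (i / 2)
decreasing_by exact Nat.div_lt_self (Nat.pos_of_ne_zero (by assumption)) (by omega)

theorem gdec_zero : gdec 0 = 0 := by unfold gdec; simp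

theorem gdec_ne {i : Nat} (h : i ≠ 0) : gdec i = i ^^^ gdec (i >>> 1) := by
  rw [Nat.shiftRight_one]; rw [gdec]; simp [h]

theorem size_shiftRight {i : Nat} (h : i ≠ 0) : Nat.size i = Nat.size (i >>> 1) + 1 := by
  conv_lhs => rw [← Nat.bit_testBit_zero_shiftRight_one i]
  rw [Nat.size_bit (by rw [Nat.bit_testBit_zero_shiftRight_one]; exact h)]

theorem shiftRight_lt {i : Nat} (h : i ≠ 0) : i >>> 1 < i := by
  rw [Nat.shiftRight_one]; exact Nat.div_lt_self (Nat.pos_of_ne_zero h) (by omega)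

theorem gdec_shift (i : Nat) : gdec i >>> 1 = gdec (i >>> 1) := by
  induction i using Nat.strong_induction_on with
  | _ i ih =>
    by_cases h : i = 0
    · subst h; simp [gdec_zero]
    · rw [gdec_ne h, Nat.shiftRight_xor_distrib, ih (i >>> 1) (shiftRight_lt h)]
      by_cases h1 : i >>> 1 = 0
      · simp [h1, gdec_zero]
      · rw [gdec_ne h1]

theorem g_gdec (i : Nat) : gdec i ^^^ (gdec i >>> 1) = i := by
  by_cases h : i = 0
  · simp [h, gdec_zero]
  · rw [gdec_shift, gdec_ne h, Nat.xor_assoc, Nat.xor_self, Nat.xor_zero]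

theorem gdec_g (j : Nat) : gdec (j ^^^ (j >>> 1)) = j := by
  induction j using Nat.strong_induction_on with
  | _ j ih =>
    by_cases h : j = 0
    · simp [h, gdec_zero]
    · have hx : j ^^^ (j >>> 1) ≠ 0 := by
        intro hx
        have : j = j >>> 1 := by
          have := Nat.xor_eq_zero_iff.mp hx
          exact this
        have := shiftRight_lt h
        omega
      rw [gdec_ne hx, Nat.shiftRight_xor_distrib, ← Nat.shiftRight_add]
      have h2 : j >>> (1 + 1) = (j >>> 1) >>> 1 := by rw [Nat.shiftRight_add]
      rw [h2, ih (j >>> 1) (shiftRight_lt h)]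
      rw [Nat.xor_assoc, Nat.xor_self, Nat.xor_zero]

theorem g_inj : Function.Injective (fun j : Nat => j ^^^ (j >>> 1)) := by
  intro a b h
  have := congrArg gdec h
  simpa [gdec_g] using this

theorem gdec_lt {n : Nat} (hpre : ∀ i < n, (i ^^^ (i >>> 1)) < n) :
    ∀ i < n, gdec i < n := by
  intro i hi
  have himg : (Finset.range n).image (fun j => j ^^^ (j >>> 1)) = Finset.range n := by
    apply Finset.eq_of_subset_of_card_le
    · intro x hx
      simp only [Finset.mem_image, Finset.mem_range] at hx ⊢
      obtain ⟨j, hj, rfl⟩ := hx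
      exact hpre j hj
    · rw [Finset.card_image_of_injective _ g_inj]
  have : i ∈ (Finset.range n).image (fun j => j ^^^ (j >>> 1)) := by
    rw [himg]; exact Finset.mem_range.mpr hi
  simp only [Finset.mem_image, Finset.mem_range] at this
  obtain ⟨j, hj, hji⟩ := this
  have : gdec i = j := by rw [← hji, gdec_g]
  omega

theorem foldl_append_map (f : Nat → Int) (l : List Nat) (acc : List Int) :
    l.foldl (fun r i => r ++ [f i]) acc = acc ++ l.map f := by
  induction l generalizing acc with
  | nil => simp
  | cons x xs ih => simp [List.foldl_cons, ih]

theorem xor_foldl_factor (h : Nat → Nat) (l : List Nat) (a b : Nat) :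
    l.foldl (fun r k => r ^^^ h k) (a ^^^ b) = a ^^^ l.foldl (fun r k => r ^^^ h k) b := by
  induction l generalizing b with
  | nil => rfl
  | cons x xs ih => simp only [List.foldl_cons, Nat.xor_assoc]; exact ih (b ^^^ h x)

theorem foldl_shift (i : Nat) (m : Nat) : ∀ (s a : Nat),
    (List.range' (s + 1) m).foldl (fun r k => r ^^^ (i >>> k)) a
      = (List.range' s m).foldl (fun r k => r ^^^ ((i >>> 1) >>> k)) a := by
  induction m with
  | zero => intro s a; rfl
  | succ m ih =>
    intro s a
    rw [List.range'_succ, List.range'_succ]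
    simp only [List.foldl_cons]
    rw [ih (s + 1)]
    congr 1
    rw [← Nat.shiftRight_add, Nat.add_comm 1 s, Nat.shiftRight_add]

theorem decA_eq_gdec (i : Nat) :
    (List.range' 1 (Nat.size i - 1)).foldl (fun ri ji => ri ^^^ (i >>> ji)) i = gdec i := by
  induction i using Nat.strong_induction_on with
  | _ i ih =>
    by_cases h : i = 0
    · subst h; simp [Nat.size_zero, gdec_zero]
    · rw [size_shiftRight h, Nat.add_sub_cancel]
      have h0 : (List.range' 1 (Nat.size (i >>> 1))).foldl (fun ri ji => ri ^^^ (i >>> ji)) i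
          = (List.range' 0 (Nat.size (i >>> 1))).foldl (fun ri ji => ri ^^^ ((i >>> 1) >>> ji)) i :=
        foldl_shift i _ 0 i
      rw [h0]
      by_cases h1 : i >>> 1 = 0
      · simp [h1, Nat.size_zero, gdec_ne h, gdec_zero]
      · have hm : Nat.size (i >>> 1) = (Nat.size (i >>> 1) - 1) + 1 := by
          have := Nat.size_pos.mpr (Nat.pos_of_ne_zero h1)
          omega
        rw [hm, List.range'_succ, List.foldl_cons, Nat.shiftRight_zero]
        rw [xor_foldl_factor _ _ i (i >>> 1), ih (i >>> 1) (shiftRight_lt h)]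
        rw [gdec_ne h]

theorem halfrev2_eq_map (vec : List Int) (b : Bool) :
    halfrev2 vec b = (List.range vec.length).map
      (fun i => vec.getD (if b then i ^^^ (i >>> 1) else gdec i) 0) := by
  unfold halfrev2
  cases b with
  | true =>
    simp only [if_pos]
    exact foldl_append_map _ _ []
  | false =>
    simp only [Bool.false_eq_true, if_false]
    have : ∀ i : Nat,
        (List.range' 1 (Nat.size i - 1)).foldl (fun ri ji => ri ^^^ (i >>> ji)) i = gdec i :=
      decA_eq_gdec
    simp only [this]
    exact foldl_append_map _ _ []

theorem scatter_len (vec : List Int) (l : List Nat) (acc : List Int) :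
    (l.foldl (fun res j => res.set (j ^^^ (j >>> 1)) (vec.getD j 0)) acc).length = acc.length := by
  induction l generalizing acc with
  | nil => rfl
  | cons x xs ih => rw [List.foldl_cons, ih, List.length_set]

theorem scatter_get (vec : List Int) (n : Nat) (m : Nat) :
    ∀ i, i < n →
      ∀ (h2 : i < ((List.range m).foldl
          (fun res j => res.set (j ^^^ (j >>> 1)) (vec.getD j 0)) (List.replicate n 0)).length),
      ((List.range m).foldl (fun res j => res.set (j ^^^ (j >>> 1)) (vec.getD j 0))
          (List.replicate n 0))[i]'h2 =
        if gdec i < m then vec.getD (gdec i) 0 else 0 := by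
  induction m with
  | zero =>
    intro i hi h2
    simp [List.getElem_replicate]
  | succ m ih =>
    intro i hi h2
    simp only [List.range_succ, List.foldl_append, List.foldl_cons, List.foldl_nil] at h2 ⊢
    rw [List.getElem_set]
    by_cases he : m ^^^ (m >>> 1) = i
    · rw [if_pos he]
      have hg : gdec i = m := by rw [← he, gdec_g]
      rw [hg]
      simp
    · rw [if_neg he]
      rw [ih i hi (by simpa using h2)]
      have hne : gdec i ≠ m := by
        intro hd
        apply he
        rw [← hd, g_gdec]
      by_cases hlt : gdec i < m
      · rw [if_pos hlt, if_pos (by omega)]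
      · rw [if_neg hlt, if_neg (by omega)]

-- ===== VERDICT (by name: the statement is the Claim_ definition above) =====
theorem halfrev2_spec : Claim_equal_halfrev2 := by
  intro vec pre_rev _ hpre
  unfold Spec_halfrev2
  rw [halfrev2_eq_map]
  cases pre_rev with
  | true => simp [halfrev2_alt]
  | false =>
    unfold halfrev2_alt
    simp only [Bool.false_eq_true, if_false]
    apply List.ext_getElem
    · rw [List.length_map, List.length_range, scatter_len, List.length_replicate]
    · intro i h1 h2
      have hi : i < vec.length := by simpa using h1
      rw [List.getElem_map]
      rw [scatter_get vec vec.length vec.length i hi h2]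
      rw [if_pos (gdec_lt hpre i hi)]
      simp
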